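-- pv_equiv track=rewrite | github.com/emmanuelgkn/projet_MOGPL | resolution_instance.py | croisements_valides
-- ===== SOURCE A (Python) =====
-- def croisements_valides(N, M, obstacles):
--     valide = [[True for _ in range(M+1)] for _ in range(N+1)]
--
--     for i in range(N+1):
--         for j in range(M+1):
--             for r in (i-1,i):
--                 for c in (j-1,j):
--                     if (0 <= r < N) and (0 <= c < M):
--                         if obstacles[r][c] == 1:
--                             valide[i][j] = False
--     return valide
-- ===== SOURCE B (Python) =====
-- def croisements_valides(N, M, obstacles):
--     valide = [[True] * (M + 1) for _ in range(N + 1)]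
--     for r in range(N):
--         for c in range(M):
--             if obstacles[r][c] == 1:
--                 valide[r][c] = False
--                 valide[r][c + 1] = False
--                 valide[r + 1][c] = False
--                 valide[r + 1][c + 1] = False
--     return valide
-- ===== Notes on version B (the rewrite author's own statement) =====
-- stated objective: alternative
-- what changed: Instead of gathering per intersection (for each of the (N+1)*(M+1) intersections scan its up-to-4 incident cells with range guards), B scatters: one pass over the N*M obstacle cells, and each cell equal to 1 marks its 4 incident intersections False.
import Mathlib
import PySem

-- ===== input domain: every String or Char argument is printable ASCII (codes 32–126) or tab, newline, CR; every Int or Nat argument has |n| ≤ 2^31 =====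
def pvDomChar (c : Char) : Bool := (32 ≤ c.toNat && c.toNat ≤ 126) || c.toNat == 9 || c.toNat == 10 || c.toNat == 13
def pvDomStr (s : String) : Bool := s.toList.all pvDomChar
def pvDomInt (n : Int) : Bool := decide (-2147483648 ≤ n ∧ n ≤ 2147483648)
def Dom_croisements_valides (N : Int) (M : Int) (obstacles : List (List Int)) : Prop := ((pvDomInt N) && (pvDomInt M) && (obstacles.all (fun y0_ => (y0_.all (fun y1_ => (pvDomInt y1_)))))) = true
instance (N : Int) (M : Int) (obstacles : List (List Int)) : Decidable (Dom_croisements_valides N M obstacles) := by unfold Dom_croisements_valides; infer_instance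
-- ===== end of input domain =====

-- B scatters invalidity from each obstacle cell to its 4 incident intersections (one test per
-- cell), instead of gathering per intersection over its up-to-4 incident cells as A does.


-- ===== PORT A =====
-- shared helpers: obstacles[r][c] (exact wherever Pre_ guarantees the indices are in range,
-- which is everywhere either Python consults it) and 'valide[i][j] = False'
def pvObsAt (obstacles : List (List Int)) (r c : Int) : Int :=
  (PySem.List.pyGet? ((PySem.List.pyGet? obstacles r).getD []) c).getD 0

def pvSetF (g : List (List Bool)) (i j : Int) : List (List Bool) :=
  g.modify i.toNat (fun row => row.set j.toNat false)

def croisements_valides (N : Int) (M : Int) (obstacles : List (List Int)) : List (List Bool) :=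
  let valide := (PySem.List.pyRange 0 (N+1) 1).map
    (fun _ => (PySem.List.pyRange 0 (M+1) 1).map (fun _ => true))
  (PySem.List.pyRange 0 (N+1) 1).foldl (fun g i =>
    (PySem.List.pyRange 0 (M+1) 1).foldl (fun g j =>
      [i-1, i].foldl (fun g r =>
        [j-1, j].foldl (fun g c =>
          if 0 ≤ r ∧ r < N ∧ 0 ≤ c ∧ c < M then
            if pvObsAt obstacles r c = 1 then pvSetF g i j else g
          else g) g) g) g) valide

-- ===== PORT B =====
def croisements_valides_alt (N : Int) (M : Int) (obstacles : List (List Int)) : List (List Bool) :=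
  let valide := (PySem.List.pyRange 0 (N+1) 1).map
    (fun _ => (PySem.List.pyRange 0 (M+1) 1).map (fun _ => true))
  (PySem.List.pyRange 0 N 1).foldl (fun g r =>
    (PySem.List.pyRange 0 M 1).foldl (fun g c =>
      if pvObsAt obstacles r c = 1 then
        pvSetF (pvSetF (pvSetF (pvSetF g r c) r (c+1)) (r+1) c) (r+1) (c+1)
      else g) g) valide

-- ===== PRECONDITION & SPEC =====
-- Pre_ excludes exactly the inputs where Python A raises IndexError: N,M > 0 with fewer than
-- N obstacle rows or a consulted row shorter than M. (B raises on exactly the same inputs.)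
def Pre_croisements_valides (N : Int) (M : Int) (obstacles : List (List Int)) : Prop :=
  N ≤ 0 ∨ M ≤ 0 ∨ (N ≤ (obstacles.length : Int) ∧
    ∀ row ∈ obstacles.take N.toNat, M ≤ (row.length : Int))
instance (N : Int) (M : Int) (obstacles : List (List Int)) : Decidable (Pre_croisements_valides N M obstacles) := by unfold Pre_croisements_valides; infer_instance

def pvWitness_croisements_valides : Int × Int × List (List Int) := (2, 2, [[1, 0], [0, 0]])

def Spec_croisements_valides (N : Int) (M : Int) (obstacles : List (List Int)) (out : List (List Bool)) : Prop := out = croisements_valides_alt N M obstacles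
instance (N : Int) (M : Int) (obstacles : List (List Int)) (out : List (List Bool)) : Decidable (Spec_croisements_valides N M obstacles out) := by unfold Spec_croisements_valides; infer_instance

-- ===== CLAIM (what is proved, stated in full; the proofs are below) =====
def Claim_equal_croisements_valides : Prop := ∀ (N : Int) (M : Int) (obstacles : List (List Int)), Dom_croisements_valides N M obstacles → Pre_croisements_valides N M obstacles → Spec_croisements_valides N M obstacles (croisements_valides N M obstacles)

-- ===== LEMMAS AND PROOFS =====

-- Both ports apply a list of "set cell (i,j) to False" operations to the all-True grid;
-- the final value of a cell depends only on whether some operation hits it.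
def pvApply (g : List (List Bool)) (ops : List (Int × Int)) : List (List Bool) :=
  ops.foldl (fun g p => pvSetF g p.1 p.2) g

theorem pvApply_append (g : List (List Bool)) (l1 l2 : List (Int × Int)) :
    pvApply g (l1 ++ l2) = pvApply (pvApply g l1) l2 := by
  simp [pvApply, List.foldl_append]

theorem foldl_pvApply {α : Type} (xs : List α) (F : α → List (Int × Int))
    (g : List (List Bool)) :
    xs.foldl (fun g x => pvApply g (F x)) g = pvApply g (xs.flatMap F) := by
  induction xs generalizing g with
  | nil => rfl
  | cons x xs ih => simp [List.flatMap_cons, pvApply_append, ih]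

theorem bodyA_as_apply (N M : Int) (obstacles : List (List Int)) (g : List (List Bool))
    (i j r c : Int) :
    (if 0 ≤ r ∧ r < N ∧ 0 ≤ c ∧ c < M then
        if pvObsAt obstacles r c = 1 then pvSetF g i j else g
      else g)
    = pvApply g (if (0 ≤ r ∧ r < N ∧ 0 ≤ c ∧ c < M) ∧ pvObsAt obstacles r c = 1
        then [(i, j)] else []) := by
  split_ifs with h1 h2 h3 h3 <;> first | rfl | (exfalso; tauto)

theorem bodyB_as_apply (obstacles : List (List Int)) (g : List (List Bool)) (r c : Int) :
    (if pvObsAt obstacles r c = 1 then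
        pvSetF (pvSetF (pvSetF (pvSetF g r c) r (c+1)) (r+1) c) (r+1) (c+1)
      else g)
    = pvApply g (if pvObsAt obstacles r c = 1
        then [(r, c), (r, c+1), (r+1, c), (r+1, c+1)] else []) := by
  split_ifs <;> rfl

def pvOpsA (N M : Int) (obstacles : List (List Int)) : List (Int × Int) :=
  (PySem.List.pyRange 0 (N+1) 1).flatMap (fun i =>
    (PySem.List.pyRange 0 (M+1) 1).flatMap (fun j =>
      [i-1, i].flatMap (fun r =>
        [j-1, j].flatMap (fun c =>
          if (0 ≤ r ∧ r < N ∧ 0 ≤ c ∧ c < M) ∧ pvObsAt obstacles r c = 1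
          then [(i, j)] else []))))

def pvOpsB (N M : Int) (obstacles : List (List Int)) : List (Int × Int) :=
  (PySem.List.pyRange 0 N 1).flatMap (fun r =>
    (PySem.List.pyRange 0 M 1).flatMap (fun c =>
      if pvObsAt obstacles r c = 1
      then [(r, c), (r, c+1), (r+1, c), (r+1, c+1)] else []))

def pvInit (N M : Int) : List (List Bool) :=
  (PySem.List.pyRange 0 (N+1) 1).map
    (fun _ => (PySem.List.pyRange 0 (M+1) 1).map (fun _ => true))

theorem portA_eq_apply (N M : Int) (obstacles : List (List Int)) :
    croisements_valides N M obstacles = pvApply (pvInit N M) (pvOpsA N M obstacles) := by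
  show _ = pvApply _ _
  simp only [croisements_valides, pvInit, pvOpsA, bodyA_as_apply, foldl_pvApply]

theorem portB_eq_apply (N M : Int) (obstacles : List (List Int)) :
    croisements_valides_alt N M obstacles = pvApply (pvInit N M) (pvOpsB N M obstacles) := by
  show _ = pvApply _ _
  simp only [croisements_valides_alt, pvInit, pvOpsB, bodyB_as_apply, foldl_pvApply]

-- cell (i,j) of a grid, as an Option
def pvCell (g : List (List Bool)) (i j : Nat) : Option Bool :=
  g[i]? >>= fun row => row[j]?

theorem pvCell_setF (g : List (List Bool)) (a b : Int) (i j : Nat) :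
    pvCell (pvSetF g a b) i j
      = if a.toNat = i ∧ b.toNat = j then (pvCell g i j).map (fun _ => false)
        else pvCell g i j := by
  simp only [pvCell, pvSetF, List.getElem?_modify]
  cases hg : g[i]? with
  | none => split_ifs <;> simp
  | some row =>
    by_cases ha : a.toNat = i
    · subst ha
      by_cases hb : b.toNat = j
      · subst hb
        by_cases hlt : b.toNat < row.length
        · simp [List.getElem?_set, hlt, List.getElem?_eq_getElem hlt]
        · have hnone : row[b.toNat]? = none := List.getElem?_eq_none_iff.mpr (by omega)
          simp [List.getElem?_set, hlt, hnone]
      · simp [List.getElem?_set, hb]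
    · simp [ha]

theorem pvCell_apply (ops : List (Int × Int)) (g : List (List Bool)) (i j : Nat) :
    pvCell (pvApply g ops) i j
      = if ops.any (fun q => q.1.toNat == i && q.2.toNat == j)
        then (pvCell g i j).map (fun _ => false) else pvCell g i j := by
  induction ops generalizing g with
  | nil => simp [pvApply]
  | cons p ops ih =>
    have hstep : pvApply g (p :: ops) = pvApply (pvSetF g p.1 p.2) ops := rfl
    rw [hstep, ih, pvCell_setF, List.any_cons]
    by_cases h1 : p.1.toNat = i ∧ p.2.toNat = j
    · cases pvCell g i j <;> simp [h1] <;> split_ifs <;> simp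
    · have hb : (p.1.toNat == i && p.2.toNat == j) = false := by
        simp only [Bool.and_eq_false_iff, beq_eq_false_iff_ne]; tauto
      simp only [if_neg h1, hb, Bool.false_or]

theorem length_pvApply (g : List (List Bool)) (ops : List (Int × Int)) :
    (pvApply g ops).length = g.length := by
  induction ops generalizing g with
  | nil => rfl
  | cons p ops ih =>
    have hstep : pvApply g (p :: ops) = pvApply (pvSetF g p.1 p.2) ops := rfl
    rw [hstep, ih]; simp [pvSetF]

theorem rowlen_pvApply (g : List (List Bool)) (ops : List (Int × Int)) (i : Nat) :
    ((pvApply g ops)[i]?).map List.length = (g[i]?).map List.length := by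
  induction ops generalizing g with
  | nil => rfl
  | cons p ops ih =>
    have hstep : pvApply g (p :: ops) = pvApply (pvSetF g p.1 p.2) ops := rfl
    rw [hstep, ih]
    simp only [pvSetF, List.getElem?_modify]
    cases g[i]? <;> simp <;> split_ifs <;> simp

-- hit predicate in Prop form: intersection (i,j) is incident to an obstacle cell equal to 1
def pvBad (N M : Int) (obstacles : List (List Int)) (i j : Nat) : Prop :=
  ∃ r c : Int, 0 ≤ r ∧ r < N ∧ 0 ≤ c ∧ c < M ∧ pvObsAt obstacles r c = 1 ∧
    (r = (i : Int) ∨ r = (i : Int) - 1) ∧ (c = (j : Int) ∨ c = (j : Int) - 1)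

theorem hitA_iff (N M : Int) (obstacles : List (List Int)) (i j : Nat)
    (hi : i < (N+1).toNat) (hj : j < (M+1).toNat) :
    ((pvOpsA N M obstacles).any (fun q => q.1.toNat == i && q.2.toNat == j) = true)
      ↔ pvBad N M obstacles i j := by
  simp only [pvOpsA, List.any_eq_true, List.mem_flatMap, PySem.List.mem_pyRange_one,
    List.mem_cons, List.mem_singleton, List.not_mem_nil, or_false,
    Bool.and_eq_true, beq_iff_eq]
  constructor
  · rintro ⟨q, ⟨i0, ⟨hi0l, hi0r⟩, j0, ⟨hj0l, hj0r⟩, r, hr, c, hc, hq⟩, h1, h2⟩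
    split_ifs at hq with hcond
    · simp only [List.mem_singleton] at hq
      subst hq
      simp only at h1 h2
      obtain ⟨⟨hr0, hrN, hc0, hcM⟩, hv⟩ := hcond
      have hie : i0 = (i : Int) := by omega
      have hje : j0 = (j : Int) := by omega
      subst hie; subst hje
      exact ⟨r, c, hr0, hrN, hc0, hcM, hv, by omega, by omega⟩
    · simp at hq
  · rintro ⟨r, c, hr0, hrN, hc0, hcM, hv, hri, hcj⟩
    refine ⟨((i : Int), (j : Int)),
      ⟨(i : Int), ⟨by omega, by omega⟩, (j : Int), ⟨by omega, by omega⟩,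
        r, by omega, c, by omega,
        by rw [if_pos ⟨⟨hr0, hrN, hc0, hcM⟩, hv⟩]; exact List.mem_singleton.mpr rfl⟩,
      by simp, by simp⟩

theorem hitB_iff (N M : Int) (obstacles : List (List Int)) (i j : Nat) :
    ((pvOpsB N M obstacles).any (fun q => q.1.toNat == i && q.2.toNat == j) = true)
      ↔ pvBad N M obstacles i j := by
  simp only [pvOpsB, List.any_eq_true, List.mem_flatMap, PySem.List.mem_pyRange_one,
    Bool.and_eq_true, beq_iff_eq]
  constructor
  · rintro ⟨q, ⟨r, ⟨hr0, hrN⟩, c, ⟨hc0, hcM⟩, hq⟩, h1, h2⟩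
    split_ifs at hq with hv
    · simp only [List.mem_cons, List.mem_singleton, List.not_mem_nil, or_false] at hq
      refine ⟨r, c, hr0, hrN, hc0, hcM, hv, ?_, ?_⟩ <;>
        ( rcases hq with h | h | h | h <;> subst h <;> simp only at h1 h2 <;> omega )
    · simp at hq
  · rintro ⟨r, c, hr0, hrN, hc0, hcM, hv, hri, hcj⟩
    have hmem : ∀ q ∈ ([(r, c), (r, c+1), (r+1, c), (r+1, c+1)] : List (Int × Int)),
        ∃ a, (0 ≤ a ∧ a < N) ∧ ∃ b, (0 ≤ b ∧ b < M) ∧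
          q ∈ (if pvObsAt obstacles a b = 1
            then [(a, b), (a, b+1), (a+1, b), (a+1, b+1)] else ([] : List (Int × Int))) := by
      intro q hq
      exact ⟨r, ⟨hr0, hrN⟩, c, ⟨hc0, hcM⟩, by rw [if_pos hv]; exact hq⟩
    rcases hri with h | h <;> rcases hcj with h' | h'
    · exact ⟨(r, c), hmem _ (by simp), by simp only; omega, by simp only; omega⟩
    · exact ⟨(r, c+1), hmem _ (by simp), by simp only; omega, by simp only; omega⟩
    · exact ⟨(r+1, c), hmem _ (by simp), by simp only; omega, by simp only; omega⟩
    · exact ⟨(r+1, c+1), hmem _ (by simp), by simp only; omega, by simp only; omega⟩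

theorem init_getElem? (N M : Int) (i : Nat) (hi : i < (N+1).toNat) :
    (pvInit N M)[i]? = some ((PySem.List.pyRange 0 (M+1) 1).map (fun _ => true)) := by
  simp only [pvInit, List.getElem?_map]
  rw [List.getElem?_eq_getElem (by simpa [PySem.List.length_pyRange_one] using hi)]
  simp

theorem grids_eq (N M : Int) (obstacles : List (List Int)) :
    pvApply (pvInit N M) (pvOpsA N M obstacles) = pvApply (pvInit N M) (pvOpsB N M obstacles) := by
  have hinitlen : (pvInit N M).length = (N+1).toNat := by
    simp [pvInit, PySem.List.length_pyRange_one]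
  have hlenA := length_pvApply (pvInit N M) (pvOpsA N M obstacles)
  have hlenB := length_pvApply (pvInit N M) (pvOpsB N M obstacles)
  apply List.ext_getElem?
  intro i
  by_cases hi : i < (N+1).toNat
  · rw [List.getElem?_eq_getElem (l := pvApply (pvInit N M) (pvOpsA N M obstacles)) (by omega),
      List.getElem?_eq_getElem (l := pvApply (pvInit N M) (pvOpsB N M obstacles)) (by omega)]
    congr 1
    have hrA : (pvApply (pvInit N M) (pvOpsA N M obstacles))[i]? =
        some ((pvApply (pvInit N M) (pvOpsA N M obstacles))[i]'(by omega)) :=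
      List.getElem?_eq_getElem (by omega)
    have hrB : (pvApply (pvInit N M) (pvOpsB N M obstacles))[i]? =
        some ((pvApply (pvInit N M) (pvOpsB N M obstacles))[i]'(by omega)) :=
      List.getElem?_eq_getElem (by omega)
    have hlA : ((pvApply (pvInit N M) (pvOpsA N M obstacles))[i]'(by omega)).length = (M+1).toNat := by
      have h := rowlen_pvApply (pvInit N M) (pvOpsA N M obstacles) i
      rw [hrA, init_getElem? N M i hi] at h
      simpa [PySem.List.length_pyRange_one] using h
    have hlB : ((pvApply (pvInit N M) (pvOpsB N M obstacles))[i]'(by omega)).length = (M+1).toNat := by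
      have h := rowlen_pvApply (pvInit N M) (pvOpsB N M obstacles) i
      rw [hrB, init_getElem? N M i hi] at h
      simpa [PySem.List.length_pyRange_one] using h
    apply List.ext_getElem?
    intro j
    by_cases hj : j < (M+1).toNat
    · have hcellinit : pvCell (pvInit N M) i j = some true := by
        have hjl : j < (List.map (fun _ => true) (PySem.List.pyRange 0 (M+1) 1)).length := by
          simpa [PySem.List.length_pyRange_one] using hj
        simp [pvCell, init_getElem? N M i hi, List.getElem?_eq_getElem hjl, List.getElem?_replicate, hj]
      have hcA : pvCell (pvApply (pvInit N M) (pvOpsA N M obstacles)) i j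
          = ((pvApply (pvInit N M) (pvOpsA N M obstacles))[i]'(by omega))[j]? := by
        simp [pvCell, hrA]
      have hcB : pvCell (pvApply (pvInit N M) (pvOpsB N M obstacles)) i j
          = ((pvApply (pvInit N M) (pvOpsB N M obstacles))[i]'(by omega))[j]? := by
        simp [pvCell, hrB]
      have hhit : ((pvOpsA N M obstacles).any (fun q => q.1.toNat == i && q.2.toNat == j))
          = ((pvOpsB N M obstacles).any (fun q => q.1.toNat == i && q.2.toNat == j)) := by
        have h1 := hitA_iff N M obstacles i j hi hj
        have h2 := hitB_iff N M obstacles i j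
        by_cases hb : pvBad N M obstacles i j
        · rw [h1.mpr hb, h2.mpr hb]
        · rcases hx : (pvOpsA N M obstacles).any (fun q => q.1.toNat == i && q.2.toNat == j) <;>
          rcases hy : (pvOpsB N M obstacles).any (fun q => q.1.toNat == i && q.2.toNat == j) <;>
            first | rfl | (exact absurd (h1.mp hx) hb) | (exact absurd (h2.mp hy) hb)
      rw [← hcA, ← hcB, pvCell_apply, pvCell_apply, hcellinit, hhit]
    · rw [List.getElem?_eq_none_iff.mpr (by omega), List.getElem?_eq_none_iff.mpr (by omega)]
  · rw [List.getElem?_eq_none_iff.mpr (by omega), List.getElem?_eq_none_iff.mpr (by omega)]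

-- ===== VERDICT (by name: the statement is the Claim_ definition above) =====
theorem croisements_valides_spec : Claim_equal_croisements_valides := by
  intro N M obstacles _ _
  show croisements_valides N M obstacles = croisements_valides_alt N M obstacles
  rw [portA_eq_apply, portB_eq_apply, grids_eq]
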